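-- pv_equiv track=rewrite | github.com/C00reNUT/neural-style | common_images.py | trim_starting_filename
-- ===== SOURCE A (Python) =====
-- EXTENSIONS = [ '.jpg', '.bmp', '.png', '.tga' ]
--
-- def trim_starting_filename(str):
--     min_ext_pos = len(str)
--     min_ext_idx = -1
--     for i in range(len(EXTENSIONS)):
--         filename_ext = str.find(EXTENSIONS[i])
--         if filename_ext != -1 and filename_ext < min_ext_pos:
--             min_ext_pos = filename_ext
--             min_ext_idx = i
--
--     filename = str
--     if min_ext_idx != -1:
--         filename = str[0:min_ext_pos + len(EXTENSIONS[min_ext_idx])]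
--
--     # move pointer to after the filename
--     str = str[len(filename):]
--     return filename, str
-- ===== SOURCE B (Python) =====
-- EXTENSIONS = [ '.jpg', '.bmp', '.png', '.tga' ]
--
-- def trim_starting_filename(str):
--     # single left-to-right scan: the first position where any extension starts
--     # is exactly the minimum over the per-extension find positions
--     for i in range(len(str)):
--         for ext in EXTENSIONS:
--             if str.startswith(ext, i):
--                 cut = i + len(ext)
--                 return str[:cut], str[cut:]
--     return str, ''
-- ===== Notes on version B (the rewrite author's own statement) =====
-- stated objective: alternative
-- what changed: Replaces the four full-string find() passes plus running-minimum bookkeeping with a single left-to-right scan that stops at the first position where any extension starts (leftmost match equals the minimum of the per-extension find positions).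
import Mathlib
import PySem

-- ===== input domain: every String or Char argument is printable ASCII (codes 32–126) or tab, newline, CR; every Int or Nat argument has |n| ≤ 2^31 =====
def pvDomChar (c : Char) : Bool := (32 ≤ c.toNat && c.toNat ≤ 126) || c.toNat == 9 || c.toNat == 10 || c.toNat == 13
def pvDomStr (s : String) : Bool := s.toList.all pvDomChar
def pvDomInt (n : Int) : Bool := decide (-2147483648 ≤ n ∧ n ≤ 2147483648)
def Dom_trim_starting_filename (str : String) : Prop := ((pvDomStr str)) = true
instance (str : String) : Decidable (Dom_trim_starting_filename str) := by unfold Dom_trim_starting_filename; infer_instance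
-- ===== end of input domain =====

-- B replaces A's four full-string find() passes plus running-minimum bookkeeping with a
-- single left-to-right scan stopping at the first position where any extension starts
-- (alternative decomposition, same asymptotic cost).

-- ===== PORT A =====
def EXTENSIONS : List String := [".jpg", ".bmp", ".png", ".tga"]

-- one iteration of A's 'for i in range(len(EXTENSIONS))' loop, state = (min_ext_pos, min_ext_idx)
def stepA (s : String) (st : Int × Int) (i : Int) : Int × Int :=
  let filename_ext := PySem.Str.find s (PySem.List.pyGetD EXTENSIONS i "")
  if filename_ext ≠ -1 ∧ filename_ext < st.1 then (filename_ext, i) else st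

def trim_starting_filename (str : String) : String × String :=
  let st := (PySem.List.pyRange 0 ((EXTENSIONS.length : Int)) 1).foldl (stepA str) (PySem.Str.len str, -1)
  let filename :=
    if st.2 ≠ -1 then
      PySem.Str.slice str (some 0) (some (st.1 + PySem.Str.len (PySem.List.pyGetD EXTENSIONS st.2 "")))
    else str
  (filename, PySem.Str.slice str (some (PySem.Str.len filename)) none)

-- ===== PORT B =====
-- Source B's scan: walk the positions left to right; at the first position where some
-- extension starts, return the Python cut position i + len(ext); none when the loop falls through.
def findCutB (cs : List Char) (i : Nat) : Option Nat :=
  match cs with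
  | [] => none
  | _ :: rest =>
    match EXTENSIONS.find? (fun e => e.toList.isPrefixOf cs) with
    | some e => some (i + e.toList.length)
    | none => findCutB rest (i + 1)

def trim_starting_filename_alt (str : String) : String × String :=
  match findCutB str.toList 0 with
  | some cut => (String.ofList (str.toList.take cut), String.ofList (str.toList.drop cut))
  | none => (str, "")

-- ===== PRECONDITION & SPEC =====
def Spec_trim_starting_filename (str : String) (out : String × String) : Prop := out = trim_starting_filename_alt str
instance (str : String) (out : String × String) : Decidable (Spec_trim_starting_filename str out) := by unfold Spec_trim_starting_filename; infer_instance

-- ===== CLAIM (what is proved, stated in full; the proofs are below) =====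
def Claim_equal_trim_starting_filename : Prop := ∀ (str : String), Dom_trim_starting_filename str → Spec_trim_starting_filename str (trim_starting_filename str)

-- ===== LEMMAS AND PROOFS =====

-- "some extension starts at position j of cs"
def matchP (cs : List Char) (j : Nat) : Prop := ∃ e ∈ EXTENSIONS, e.toList <+: cs.drop j

lemma ext_len : ∀ e ∈ EXTENSIONS, e.toList.length = 4 := by decide

lemma matchP_nil (j : Nat) : ¬ matchP [] j := by
  rintro ⟨e, he, hp⟩
  have h4 := ext_len e he
  have : e.toList = [] := List.prefix_nil.mp (by simpa using hp)
  simp [this] at h4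

lemma find?_eq_none_of_not_matchP (cs : List Char) (h : ¬ matchP cs 0) :
    EXTENSIONS.find? (fun e => e.toList.isPrefixOf cs) = none := by
  rcases hs : EXTENSIONS.find? (fun e => e.toList.isPrefixOf cs) with _ | e
  · exact hs
  · exact absurd ⟨e, List.mem_of_find?_eq_some hs,
      by simpa using List.isPrefixOf_iff_prefix.mp (List.find?_eq_some_iff_append.mp hs).1⟩ h

lemma findCutB_none (cs : List Char) (i : Nat) (h : ∀ j, ¬ matchP cs j) :
    findCutB cs i = none := by
  induction cs generalizing i with
  | nil => rfl
  | cons c rest ih =>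
    rw [findCutB, find?_eq_none_of_not_matchP _ (h 0)]
    exact ih (i + 1) (fun j => h (j + 1))

lemma findCutB_some (cs : List Char) (i m : Nat) (hm : matchP cs m)
    (hmin : ∀ j < m, ¬ matchP cs j) : findCutB cs i = some (i + m + 4) := by
  induction cs generalizing i m with
  | nil => exact absurd hm (matchP_nil m)
  | cons c rest ih =>
    cases m with
    | zero =>
      obtain ⟨e, he, hp⟩ := hm
      have hsome : (EXTENSIONS.find? (fun e => e.toList.isPrefixOf (c :: rest))).isSome := by
        rw [List.find?_isSome]
        exact ⟨e, he, List.isPrefixOf_iff_prefix.mpr (by simpa using hp)⟩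
      obtain ⟨e', he'⟩ := Option.isSome_iff_exists.mp hsome
      rw [findCutB, he']
      show some (i + e'.toList.length) = some (i + 0 + 4)
      rw [ext_len e' (List.mem_of_find?_eq_some he')]
    | succ m =>
      rw [findCutB, find?_eq_none_of_not_matchP _ (hmin 0 (Nat.succ_pos m))]
      show findCutB rest (i + 1) = some (i + (m + 1) + 4)
      rw [ih (i + 1) m hm (fun j hj => hmin (j + 1) (by omega))]
      simp only [Option.some.injEq]
      omega

lemma prefix_drop_len_le {cs e : List Char} {k : Nat} (hp : e <+: cs.drop k)
    (hk : k ≤ cs.length) : k + e.length ≤ cs.length := by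
  have := hp.length_le
  simp only [List.length_drop] at this
  omega

-- facts about one of A's find() results relative to the leftmost overall match position m
lemma find_facts (cs : List Char) (e : String) (he : e ∈ EXTENSIONS) (m : Nat)
    (hmin : ∀ j < m, ¬ matchP cs j) :
    PySem.Chars.find cs e.toList = -1 ∨
      ((m : Int) ≤ PySem.Chars.find cs e.toList ∧
        PySem.Chars.find cs e.toList + 4 ≤ (cs.length : Int)) := by
  by_cases hne : PySem.Chars.find cs e.toList = -1
  · exact Or.inl hne
  · right
    have h0 : 0 ≤ PySem.Chars.find cs e.toList := by
      have := PySem.Chars.neg_one_le_find cs e.toList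
      omega
    obtain ⟨hp, _⟩ := PySem.Chars.find_spec h0
    have hk : (PySem.Chars.find cs e.toList).toNat ≤ cs.length := by
      have := PySem.Chars.find_le_length cs e.toList
      omega
    have hge : m ≤ (PySem.Chars.find cs e.toList).toNat := by
      by_contra hlt
      exact hmin _ (by omega) ⟨e, he, hp⟩
    have hlen := prefix_drop_len_le hp hk
    rw [ext_len e he] at hlen
    omega

lemma find_exists_min (cs : List Char) (m : Nat) (hm : matchP cs m)
    (hmin : ∀ j < m, ¬ matchP cs j) :
    ∃ e ∈ EXTENSIONS, PySem.Chars.find cs e.toList = (m : Int) := by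
  obtain ⟨e, he, hp⟩ := hm
  refine ⟨e, he, ?_⟩
  have hne : PySem.Chars.find cs e.toList ≠ -1 := by
    rw [PySem.Chars.find_ne_neg_one_iff]
    exact (PySem.Chars.isIn_iff_infix _ _).mp
      ((PySem.Chars.exists_prefix_drop_iff_isIn _ _).mp ⟨m, hp⟩)
  have h0 : 0 ≤ PySem.Chars.find cs e.toList := by
    have := PySem.Chars.neg_one_le_find cs e.toList
    omega
  obtain ⟨hp', hmin'⟩ := PySem.Chars.find_spec h0
  have hle : (PySem.Chars.find cs e.toList).toNat ≤ m := by
    by_contra hlt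
    exact hmin' m (by omega) hp
  have hge : m ≤ (PySem.Chars.find cs e.toList).toNat := by
    by_contra hlt
    exact hmin _ (by omega) ⟨e, he, hp'⟩
  omega

lemma sliceA_take (s : String) (m : Nat) :
    PySem.Str.slice s (some 0) (some ((m : Int) + 4)) = String.ofList (s.toList.take (m + 4)) := by
  apply String.toList_inj.mp
  rw [PySem.Str.toList_slice]
  unfold PySem.Chars.slice
  rw [PySem.List.slice_zero_start]
  have h : ((m : Int) + 4) = ((m + 4 : Nat) : Int) := by push_cast; ring
  rw [h, PySem.List.slice_to_natCast, String.toList_ofList]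

lemma sliceA_drop (s : String) (k : Nat) :
    PySem.Str.slice s (some ((k : Int))) none = String.ofList (s.toList.drop k) := by
  apply String.toList_inj.mp
  rw [PySem.Str.toList_slice]
  unfold PySem.Chars.slice
  rw [PySem.List.slice_from_natCast, String.toList_ofList]

lemma pyGetD_len (i : Int) (h : i = 0 ∨ i = 1 ∨ i = 2 ∨ i = 3) :
    PySem.Str.len (PySem.List.pyGetD EXTENSIONS i "") = 4 := by
  rcases h with rfl | rfl | rfl | rfl <;> decide

-- the main equivalence, both branches
theorem trim_eq (s : String) : trim_starting_filename s = trim_starting_filename_alt s := by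
  classical
  set cs := s.toList with hcs
  have hrange : PySem.List.pyRange 0 ((EXTENSIONS.length : Int)) 1 = [0, 1, 2, 3] := by decide
  have g0 : PySem.List.pyGetD EXTENSIONS 0 "" = ".jpg" := by decide
  have g1 : PySem.List.pyGetD EXTENSIONS 1 "" = ".bmp" := by decide
  have g2 : PySem.List.pyGetD EXTENSIONS 2 "" = ".png" := by decide
  have g3 : PySem.List.pyGetD EXTENSIONS 3 "" = ".tga" := by decide
  by_cases hex : ∃ j, matchP cs j
  · -- some extension occurs; m = leftmost position where one starts
    haveI : DecidablePred (matchP cs) := fun j => by unfold matchP; infer_instance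
    obtain ⟨m, hm, hmin⟩ : ∃ m, matchP cs m ∧ ∀ j < m, ¬ matchP cs j :=
      ⟨Nat.find hex, Nat.find_spec hex, fun j hj => Nat.find_min hex hj⟩
    have hm4 : m + 4 ≤ cs.length := by
      obtain ⟨e, he, hp⟩ := hm
      have hk : m ≤ cs.length := by
        by_contra hgt
        rw [List.drop_eq_nil_of_le (by omega)] at hp
        have h4 := ext_len e he
        have : e.toList = [] := List.prefix_nil.mp hp
        simp [this] at h4
      have := prefix_drop_len_le hp hk
      rw [ext_len e he] at this
      omega
    have F0 := find_facts cs ".jpg" (by decide) m hmin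
    have F1 := find_facts cs ".bmp" (by decide) m hmin
    have F2 := find_facts cs ".png" (by decide) m hmin
    have F3 := find_facts cs ".tga" (by decide) m hmin
    have E : PySem.Chars.find cs ".jpg".toList = (m : Int) ∨
        PySem.Chars.find cs ".bmp".toList = (m : Int) ∨
        PySem.Chars.find cs ".png".toList = (m : Int) ∨
        PySem.Chars.find cs ".tga".toList = (m : Int) := by
      obtain ⟨e, he, hfe⟩ := find_exists_min cs m hm hmin
      fin_cases he
      · exact Or.inl hfe
      · exact Or.inr (Or.inl hfe)
      · exact Or.inr (Or.inr (Or.inl hfe))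
      · exact Or.inr (Or.inr (Or.inr hfe))
    have hfold :
        (((PySem.List.pyRange 0 ((EXTENSIONS.length : Int)) 1).foldl (stepA s)
          (PySem.Str.len s, -1))).1 = (m : Int) ∧
        (0 ≤ (((PySem.List.pyRange 0 ((EXTENSIONS.length : Int)) 1).foldl (stepA s)
          (PySem.Str.len s, -1))).2 ∧
        (((PySem.List.pyRange 0 ((EXTENSIONS.length : Int)) 1).foldl (stepA s)
          (PySem.Str.len s, -1))).2 ≤ 3) := by
      rw [hrange]
      simp only [List.foldl_cons, List.foldl_nil, stepA, PySem.Str.find_eq, PySem.Str.len_eq]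
      rw [g0, g1, g2, g3, ← hcs]
      split_ifs <;> (try dsimp only at *) <;> refine ⟨?_, ?_, ?_⟩ <;> omega
    obtain ⟨h1, h23⟩ := hfold
    -- reduce A to explicit slices
    show (let st := (PySem.List.pyRange 0 ((EXTENSIONS.length : Int)) 1).foldl (stepA s)
            (PySem.Str.len s, -1)
          let filename := if st.2 ≠ -1 then
              PySem.Str.slice s (some 0) (some (st.1 + PySem.Str.len (PySem.List.pyGetD EXTENSIONS st.2 "")))
            else s
          (filename, PySem.Str.slice s (some (PySem.Str.len filename)) none)) = _
    have hne : ((PySem.List.pyRange 0 ((EXTENSIONS.length : Int)) 1).foldl (stepA s)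
        (PySem.Str.len s, -1)).2 ≠ -1 := by omega
    have hL : PySem.Str.len (PySem.List.pyGetD EXTENSIONS
        ((PySem.List.pyRange 0 ((EXTENSIONS.length : Int)) 1).foldl (stepA s)
          (PySem.Str.len s, -1)).2 "") = 4 := pyGetD_len _ (by omega)
    simp only [hne, if_true, ne_eq, not_false_iff, h1, hL]
    rw [sliceA_take s m]
    have hlenfn : PySem.Str.len (String.ofList (s.toList.take (m + 4))) = ((m + 4 : Nat) : Int) := by
      rw [PySem.Str.len_eq, String.toList_ofList, List.length_take]
      rw [← hcs]
      omega
    rw [hlenfn, sliceA_drop s (m + 4)]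
    -- reduce B
    show _ = (match findCutB cs 0 with
      | some cut => (String.ofList (cs.take cut), String.ofList (cs.drop cut))
      | none => (s, ""))
    rw [findCutB_some cs 0 m hm hmin]
    show (String.ofList (cs.take (m + 4)), String.ofList (cs.drop (m + 4))) =
      (String.ofList (cs.take (0 + m + 4)), String.ofList (cs.drop (0 + m + 4)))
    rw [Nat.zero_add]
  · -- no extension occurs anywhere in the string
    push_neg at hex
    have hB : findCutB cs 0 = none := findCutB_none cs 0 hex
    have hfind : ∀ e ∈ EXTENSIONS, PySem.Chars.find cs e.toList = -1 := by
      intro e he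
      rw [PySem.Chars.find_eq_neg_one_iff]
      intro hin
      obtain ⟨j, hj⟩ := (PySem.Chars.exists_prefix_drop_iff_isIn e.toList cs).mpr
        ((PySem.Chars.isIn_iff_infix _ _).mpr hin)
      exact hex j ⟨e, he, hj⟩
    have hfold : ((PySem.List.pyRange 0 ((EXTENSIONS.length : Int)) 1).foldl (stepA s)
        (PySem.Str.len s, -1)) = (PySem.Str.len s, -1) := by
      rw [hrange]
      simp only [List.foldl_cons, List.foldl_nil, stepA, PySem.Str.find_eq]
      rw [g0, g1, g2, g3, ← hcs,
        hfind ".jpg" (by decide), hfind ".bmp" (by decide),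
        hfind ".png" (by decide), hfind ".tga" (by decide)]
      simp
    have hBeq : trim_starting_filename_alt s = (s, "") := by
      show (match findCutB cs 0 with
        | some cut => (String.ofList (cs.take cut), String.ofList (cs.drop cut))
        | none => (s, "")) = (s, "")
      rw [hB]
    rw [hBeq]
    show (let st := (PySem.List.pyRange 0 ((EXTENSIONS.length : Int)) 1).foldl (stepA s)
            (PySem.Str.len s, -1)
          let filename := if st.2 ≠ -1 then
              PySem.Str.slice s (some 0) (some (st.1 + PySem.Str.len (PySem.List.pyGetD EXTENSIONS st.2 "")))
            else s
          (filename, PySem.Str.slice s (some (PySem.Str.len filename)) none)) = (s, "")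
    rw [hfold]
    norm_num
    have h2 : ((s.length : Int)) = ((s.toList.length : Nat) : Int) := by simp
    rw [h2, sliceA_drop s s.toList.length, List.drop_length]

-- ===== VERDICT (by name: the statement is the Claim_ definition above) =====
theorem trim_starting_filename_spec : Claim_equal_trim_starting_filename := by
  intro s _
  unfold Spec_trim_starting_filename
  exact trim_eq s
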